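-- pv_equiv track=rewrite | github.com/SANGAVI-KRISH/-Graph-Edge-Coloring | Graph Edge Coloring/GRAPH/EdgeColoring/GraphStructure/graph.py | fan
-- ===== SOURCE A (Python) =====
-- def fan(n):
--     graph = {i: [] for i in range(n)}
--     for i in range(1, n):
--         graph[0].append(i)
--         graph[i].append(0)
--     for i in range(1, n - 1, 2):
--         graph[i].append(i + 1)
--         graph[i + 1].append(i)
--     return graph
-- ===== SOURCE B (Python) =====
-- def fan(n):
--     def nbrs(i):
--         if i == 0:
--             return list(range(1, n))
--         if i % 2 == 1:
--             return [0, i + 1] if i + 1 < n else [0]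
--         return [0, i - 1]
--     return {i: nbrs(i) for i in range(n)}
-- ===== Notes on version B (the rewrite author's own statement) =====
-- stated objective: alternative
-- what changed: B computes each vertex's neighbour list in closed form (the hub lists all other vertices; every other vertex lists the hub and then its pair partner, when it has one) in a single dict comprehension, instead of A's two in-place append loops mutating a pre-initialised dict.
import Mathlib
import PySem

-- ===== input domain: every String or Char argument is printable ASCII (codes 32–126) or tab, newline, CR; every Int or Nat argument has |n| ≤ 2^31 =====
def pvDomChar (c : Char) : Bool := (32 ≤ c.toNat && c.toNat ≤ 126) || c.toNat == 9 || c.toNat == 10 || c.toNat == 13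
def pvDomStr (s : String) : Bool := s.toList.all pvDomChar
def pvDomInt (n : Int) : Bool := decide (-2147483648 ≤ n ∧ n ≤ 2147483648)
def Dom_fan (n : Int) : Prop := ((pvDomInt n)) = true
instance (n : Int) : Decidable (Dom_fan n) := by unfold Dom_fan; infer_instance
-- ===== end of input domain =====

-- B replaces A's three mutation loops over a dict by a closed-form neighbour list per
-- vertex built in one comprehension ('alternative' objective; same return value).

-- ===== PORT A =====
-- graph = {i: [] for i in range(n)}; two append loops; return graph (as its items list).
def fan (n : Int) : List (Int × List Int) :=
  let graph : PySem.Dict Int (List Int) :=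
    (PySem.List.pyRange 0 n 1).foldl (fun d i => d.insert i []) PySem.Dict.empty
  let graph :=
    (PySem.List.pyRange 1 n 1).foldl
      (fun d i => (d.modify 0 [] (· ++ [i])).modify i [] (· ++ [0])) graph
  let graph :=
    (PySem.List.pyRange 1 (n - 1) 2).foldl
      (fun d i => (d.modify i [] (· ++ [i + 1])).modify (i + 1) [] (· ++ [i])) graph
  graph.items

-- ===== PORT B =====
def fanNbrs (n i : Int) : List Int :=
  if i = 0 then PySem.List.pyRange 1 n 1
  else if PySem.Int.mod i 2 = 1 then (if i + 1 < n then [0, i + 1] else [0])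
  else [0, i - 1]

def fan_alt (n : Int) : List (Int × List Int) :=
  (PySem.List.pyRange 0 n 1).map (fun i => (i, fanNbrs n i))

-- ===== PRECONDITION & SPEC =====
def Spec_fan (n : Int) (out : List (Int × List Int)) : Prop := out = fan_alt n
instance (n : Int) (out : List (Int × List Int)) : Decidable (Spec_fan n out) := by unfold Spec_fan; infer_instance

-- ===== CLAIM (what is proved, stated in full; the proofs are below) =====
def Claim_equal_fan : Prop := ∀ (n : Int), Dom_fan n → Spec_fan n (fan n)

-- ===== LEMMAS AND PROOFS =====

-- keys of a dict are unchanged by a modify at a key it contains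
theorem keys_modify_of_contains {κ ν : Type} [BEq κ] [LawfulBEq κ]
    (d : PySem.Dict κ ν) (k : κ) (d0 : ν) (f : ν → ν) (h : d.contains k = true) :
    (d.modify k d0 f).keys = d.keys := by
  rw [PySem.Dict.keys_modify, PySem.Dict.keys_insert_of_contains d _ h]

-- loop 1 preserves the key list when 0 and all loop indices are already keys
theorem keys_loop1 (l : List Int) (d : PySem.Dict Int (List Int)) (R : List Int)
    (hk : d.keys = R) (h : ∀ i ∈ l, (0:Int) ∈ R ∧ i ∈ R) :
    ((l.foldl (fun d i => (d.modify 0 [] (· ++ [i])).modify i [] (· ++ [0])) d)).keys = R := by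
  induction l generalizing d with
  | nil => simpa using hk
  | cons i l ih =>
    have h0 := (h i (by simp)).1
    have hi := (h i (by simp)).2
    simp only [List.foldl_cons]
    apply ih
    · have c0 : d.contains (0:Int) = true := (PySem.Dict.contains_iff_mem_keys d 0).2 (hk ▸ h0)
      have hk' : (d.modify 0 [] (· ++ [i])).keys = R := by
        rw [keys_modify_of_contains _ _ _ _ c0, hk]
      have ci : (d.modify 0 [] (· ++ [i])).contains i = true :=
        (PySem.Dict.contains_iff_mem_keys _ i).2 (hk' ▸ hi)
      rw [keys_modify_of_contains _ _ _ _ ci, hk']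
    · exact fun j hj => h j (by simp [hj])

-- loop 2 preserves the key list when i and i+1 are already keys for every loop index i
theorem keys_loop2 (l : List Int) (d : PySem.Dict Int (List Int)) (R : List Int)
    (hk : d.keys = R) (h : ∀ i ∈ l, i ∈ R ∧ i + 1 ∈ R) :
    ((l.foldl (fun d i => (d.modify i [] (· ++ [i + 1])).modify (i + 1) [] (· ++ [i])) d)).keys = R := by
  induction l generalizing d with
  | nil => simpa using hk
  | cons i l ih =>
    have hi := (h i (by simp)).1
    have hi1 := (h i (by simp)).2
    simp only [List.foldl_cons]
    apply ih
    · have ci : d.contains i = true := (PySem.Dict.contains_iff_mem_keys d i).2 (hk ▸ hi)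
      have hk' : (d.modify i [] (· ++ [i + 1])).keys = R := by
        rw [keys_modify_of_contains _ _ _ _ ci, hk]
      have ci1 : (d.modify i [] (· ++ [i + 1])).contains (i + 1) = true :=
        (PySem.Dict.contains_iff_mem_keys _ _).2 (hk' ▸ hi1)
      rw [keys_modify_of_contains _ _ _ _ ci1, hk']
    · exact fun j hj => h j (by simp [hj])

-- value characterisation of loop 1
theorem getD_loop1 (l : List Int) (h0 : (0:Int) ∉ l) (hnd : l.Nodup)
    (d : PySem.Dict Int (List Int)) (k : Int) :
    ((l.foldl (fun d i => (d.modify 0 [] (· ++ [i])).modify i [] (· ++ [0])) d)).getD k [] =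
      (if k = 0 then d.getD 0 [] ++ l else if k ∈ l then d.getD k [] ++ [0] else d.getD k []) := by
  induction l generalizing d with
  | nil =>
    simp only [List.foldl_nil, List.not_mem_nil, if_false]
    by_cases hk0 : k = 0 <;> simp [hk0]
  | cons i l ih =>
    have hi0 : i ≠ 0 := fun h => h0 (by simp [h])
    have h0l : (0:Int) ∉ l := fun h => h0 (by simp [h])
    have hil : i ∉ l := (List.nodup_cons.1 hnd).1
    simp only [List.foldl_cons]
    rw [ih h0l (List.nodup_cons.1 hnd).2]
    by_cases hk0 : k = 0
    · subst hk0
      simp [PySem.Dict.getD_modify, Ne.symm hi0]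
    · by_cases hki : k = i
      · subst hki
        simp [PySem.Dict.getD_modify, hk0, hil]
      · simp [PySem.Dict.getD_modify, hk0, hki]

-- value characterisation of loop 2 (all loop indices odd, no duplicates)
theorem getD_loop2 (l : List Int) (hodd : ∀ i ∈ l, i % 2 = 1) (hnd : l.Nodup)
    (d : PySem.Dict Int (List Int)) (k : Int) :
    ((l.foldl (fun d i => (d.modify i [] (· ++ [i + 1])).modify (i + 1) [] (· ++ [i])) d)).getD k [] =
      (if k ∈ l then d.getD k [] ++ [k + 1]
       else if k - 1 ∈ l then d.getD k [] ++ [k - 1] else d.getD k []) := by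
  induction l generalizing d with
  | nil => simp
  | cons i l ih =>
    have hio : i % 2 = 1 := hodd i (by simp)
    have hil : i ∉ l := (List.nodup_cons.1 hnd).1
    have hoddl : ∀ j ∈ l, j % 2 = 1 := fun j hj => hodd j (by simp [hj])
    have hi1l : i + 1 ∉ l := fun h => by have := hoddl _ h; omega
    simp only [List.foldl_cons]
    rw [ih hoddl (List.nodup_cons.1 hnd).2]
    by_cases hki : k = i
    · subst hki
      have hk1l : k - 1 ∉ l := fun h => by have := hoddl _ h; omega
      simp [PySem.Dict.getD_modify, hil, hk1l]
    · by_cases hki1 : k = i + 1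
      · subst hki1
        have h1 : i + 1 - 1 = i := by omega
        simp [PySem.Dict.getD_modify, hi1l, h1, hil, (by omega : i + 1 ≠ i)]
      · by_cases hk1 : k - 1 = i
        · exact absurd (by omega) hki1
        · simp [PySem.Dict.getD_modify, hki, hki1, hk1]

-- the initialisation dict is the literal association list with empty values
theorem g0_items (n : Int) :
    ((PySem.List.pyRange 0 n 1).foldl (fun d i => d.insert i ([] : List Int)) PySem.Dict.empty) =
      PySem.Dict.mk ((PySem.List.pyRange 0 n 1).map (fun i => (i, []))) := by
  apply PySem.Dict.ext
  rw [show (fun (d : PySem.Dict Int (List Int)) (i : Int) => d.insert i ([] : List Int)) =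
        (fun d i => d.insert (id i) ((fun _ => ([] : List Int)) i)) from rfl]
  rw [PySem.Dict.items_foldl_insert_fresh _ id _ _ (by simp) (by simpa using PySem.List.nodup_pyRange_one 0 n)]
  simp [PySem.Dict.empty]

-- properties of the step-2 range
theorem mem_pair_range (n x : Int) :
    x ∈ PySem.List.pyRange 1 (n - 1) 2 ↔ 1 ≤ x ∧ x < n - 1 ∧ x % 2 = 1 := by
  rw [PySem.List.mem_pyRange_iff_of_pos (by norm_num)]
  constructor
  · rintro ⟨h1, h2, h3⟩; exact ⟨h1, h2, by omega⟩
  · rintro ⟨h1, h2, h3⟩; exact ⟨h1, h2, by omega⟩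

theorem nodup_pair_range (n : Int) : (PySem.List.pyRange 1 (n - 1) 2).Nodup := by
  rw [PySem.List.pyRange_of_pos _ _ (by norm_num : (0:Int) < 2)]
  exact List.nodup_range.map (fun a b h => by omega)

-- final value of entry k, for 0 ≤ k < n
theorem fan_getD (n k : Int) (hk : 0 ≤ k) (hk2 : k < n) :
    (((PySem.List.pyRange 1 (n - 1) 2).foldl
        (fun d i => (d.modify i [] (· ++ [i + 1])).modify (i + 1) [] (· ++ [i]))
        ((PySem.List.pyRange 1 n 1).foldl
          (fun d i => (d.modify 0 [] (· ++ [i])).modify i [] (· ++ [0]))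
          ((PySem.List.pyRange 0 n 1).foldl (fun d i => d.insert i ([] : List Int))
            PySem.Dict.empty)))).getD k [] = fanNbrs n k := by
  have hodd : ∀ i ∈ PySem.List.pyRange 1 (n - 1) 2, i % 2 = 1 :=
    fun i hi => ((mem_pair_range n i).1 hi).2.2
  rw [getD_loop2 _ hodd (nodup_pair_range n)]
  rw [getD_loop1 _ (by simp [PySem.List.mem_pyRange_one]) (PySem.List.nodup_pyRange_one 1 n)]
  have hg0 : ∀ j : Int,
      (((PySem.List.pyRange 0 n 1).foldl (fun d i => d.insert i ([] : List Int))
        PySem.Dict.empty)).getD j [] = [] := by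
    intro j
    rw [g0_items n]
    rw [PySem.Dict.getD_eq_get?_getD]
    cases h : (PySem.Dict.mk ((PySem.List.pyRange 0 n 1).map (fun i => (i, ([] : List Int))))).get? j with
    | none => rfl
    | some v =>
      have hmem := PySem.Dict.mem_items_of_get?_eq_some _ h
      obtain ⟨i, _, hi⟩ := List.mem_map.1 hmem
      cases hi; rfl
  by_cases hk0 : k = 0
  · subst hk0
    rw [if_neg (by rw [mem_pair_range]; omega), if_neg (by rw [mem_pair_range]; omega),
      if_pos rfl, hg0]
    simp [fanNbrs]
  · have hk1 : k ∈ PySem.List.pyRange 1 n 1 := by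
      rw [PySem.List.mem_pyRange_one]; omega
    by_cases hodd2 : k % 2 = 1
    · by_cases hkn : k + 1 < n
      · rw [if_pos (by rw [mem_pair_range]; omega), if_neg hk0, if_pos hk1, hg0]
        simp [fanNbrs, hk0, hodd2, hkn]
      · rw [if_neg (by rw [mem_pair_range]; omega), if_neg (by rw [mem_pair_range]; omega),
          if_neg hk0, if_pos hk1, hg0]
        simp [fanNbrs, hk0, hodd2, hkn]
    · rw [if_neg (by rw [mem_pair_range]; omega),
        if_pos (by rw [mem_pair_range]; omega), if_neg hk0, if_pos hk1, hg0]
      simp [fanNbrs, hk0, hodd2]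

theorem fan_keys (n : Int) :
    (((PySem.List.pyRange 1 (n - 1) 2).foldl
        (fun d i => (d.modify i [] (· ++ [i + 1])).modify (i + 1) [] (· ++ [i]))
        ((PySem.List.pyRange 1 n 1).foldl
          (fun d i => (d.modify 0 [] (· ++ [i])).modify i [] (· ++ [0]))
          ((PySem.List.pyRange 0 n 1).foldl (fun d i => d.insert i ([] : List Int))
            PySem.Dict.empty)))).keys = PySem.List.pyRange 0 n 1 := by
  apply keys_loop2
  · apply keys_loop1
    · rw [g0_items n]; simp [PySem.Dict.keys, Function.comp_def]
    · intro i hi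
      rw [PySem.List.mem_pyRange_one] at hi
      constructor <;> (rw [PySem.List.mem_pyRange_one]; omega)
  · intro i hi
    rw [mem_pair_range] at hi
    constructor <;> (rw [PySem.List.mem_pyRange_one]; omega)

-- ===== VERDICT (by name: the statement is the Claim_ definition above) =====
theorem fan_spec : Claim_equal_fan := by
  intro n _
  unfold Spec_fan fan fan_alt
  set d2 := ((PySem.List.pyRange 1 (n - 1) 2).foldl
      (fun d i => (d.modify i [] (· ++ [i + 1])).modify (i + 1) [] (· ++ [i]))
      ((PySem.List.pyRange 1 n 1).foldl
        (fun d i => (d.modify 0 [] (· ++ [i])).modify i [] (· ++ [0]))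
        ((PySem.List.pyRange 0 n 1).foldl (fun d i => d.insert i ([] : List Int))
          PySem.Dict.empty))) with hd2
  have hkeys : d2.keys = PySem.List.pyRange 0 n 1 := fan_keys n
  have hnd : d2.keys.Nodup := by rw [hkeys]; exact PySem.List.nodup_pyRange_one 0 n
  rw [PySem.Dict.items_eq_map_keys d2 hnd [], hkeys]
  apply List.map_congr_left
  intro k hk
  rw [PySem.List.mem_pyRange_one] at hk
  rw [hd2, fan_getD n k hk.1 hk.2]
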